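-- pv_equiv track=rewrite | github.com/Dudhen/Python_Basic_SkillBox | Module20/03_function/main.py | newTuple_by_sym
-- ===== SOURCE A (Python) =====
-- def newTuple_by_sym(isTuple, sym):
--     syms = list()
--     symFound = False
--     for i_sym in list(isTuple):
--         if symFound:
--             syms.append(i_sym)
--             if i_sym == sym:
--                 symFound = False
--                 break
--         elif i_sym == sym:
--             syms.append(i_sym)
--             symFound = True
--     return tuple(syms)
-- ===== SOURCE B (Python) =====
-- def newTuple_by_sym(isTuple, sym):
--     lst = list(isTuple)
--     try:
--         i = lst.index(sym)
--     except ValueError: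
--         return ()
--     try:
--         j = lst.index(sym, i + 1)
--         return tuple(lst[i:j + 1])
--     except ValueError:
--         return tuple(lst[i:])
-- ===== Notes on version B (the rewrite author's own statement) =====
-- stated objective: simpler
-- what changed: Replaces the flag-driven one-element-at-a-time accumulation loop with an index-then-slice decomposition: find the first and second occurrence with list.index and return the slice between them (to the end if there is no second occurrence, empty if there is none).
import Mathlib
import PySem

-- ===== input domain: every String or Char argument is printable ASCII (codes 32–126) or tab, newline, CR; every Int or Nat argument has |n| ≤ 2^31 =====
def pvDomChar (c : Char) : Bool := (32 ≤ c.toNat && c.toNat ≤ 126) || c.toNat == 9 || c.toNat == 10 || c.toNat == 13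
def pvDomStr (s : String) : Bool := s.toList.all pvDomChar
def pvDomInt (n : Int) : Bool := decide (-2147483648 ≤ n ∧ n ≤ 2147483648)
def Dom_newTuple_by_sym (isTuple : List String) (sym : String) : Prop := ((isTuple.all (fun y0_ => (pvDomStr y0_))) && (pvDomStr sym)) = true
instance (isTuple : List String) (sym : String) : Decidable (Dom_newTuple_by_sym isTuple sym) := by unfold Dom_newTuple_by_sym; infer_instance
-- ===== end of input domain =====

-- B replaces A's flag-driven accumulation loop with an index-then-slice decomposition (objective: simpler).


-- ===== PORT A =====
-- A's loop, split by the state of the symFound flag: ntLoopFound is the loop with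
-- symFound = True (append, break on a second match), ntLoop with symFound = False.
def ntLoopFound (sym : String) : List String → List String → List String
  | [], acc => acc
  | x :: rest, acc => if x == sym then acc ++ [x] else ntLoopFound sym rest (acc ++ [x])

def ntLoop (sym : String) : List String → List String
  | [] => []
  | x :: rest => if x == sym then ntLoopFound sym rest [x] else ntLoop sym rest

def newTuple_by_sym (isTuple : List String) (sym : String) : List String :=
  ntLoop sym isTuple

-- ===== PORT B =====
-- lst.index(sym) → PySem.List.index?; lst.index(sym, i+1) → index? on drop (i+1);
-- the slices lst[i:j+1] / lst[i:] (nonnegative in-range bounds) → drop/take, exact there.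
def newTuple_by_sym_alt (isTuple : List String) (sym : String) : List String :=
  match PySem.List.index? isTuple sym with
  | none => []
  | some i =>
    match PySem.List.index? (isTuple.drop (i + 1)) sym with
    | some k => (isTuple.drop i).take (k + 2)   -- j = i+1+k; lst[i:j+1] has length k+2
    | none => isTuple.drop i

-- ===== PRECONDITION & SPEC =====
def Spec_newTuple_by_sym (isTuple : List String) (sym : String) (out : List String) : Prop := out = newTuple_by_sym_alt isTuple sym
instance (isTuple : List String) (sym : String) (out : List String) : Decidable (Spec_newTuple_by_sym isTuple sym out) := by unfold Spec_newTuple_by_sym; infer_instance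

-- ===== CLAIM (what is proved, stated in full; the proofs are below) =====
def Claim_equal_newTuple_by_sym : Prop := ∀ (isTuple : List String) (sym : String), Dom_newTuple_by_sym isTuple sym → Spec_newTuple_by_sym isTuple sym (newTuple_by_sym isTuple sym)

-- ===== LEMMAS AND PROOFS =====

-- A's symFound-phase loop appends elements up to and including the next match (all of rest if none).
theorem ntLoopFound_eq (sym : String) (rest acc : List String) :
    ntLoopFound sym rest acc =
      acc ++ (match PySem.List.index? rest sym with
              | some k => rest.take (k + 1)
              | none => rest) := by
  induction rest generalizing acc with
  | nil => simp [ntLoopFound, PySem.List.index?]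
  | cons x xs ih =>
    by_cases hx : x = sym
    · subst hx
      rw [PySem.List.index?_cons_self]
      simp [ntLoopFound]
    · have hstep : ntLoopFound sym (x :: xs) acc = ntLoopFound sym xs (acc ++ [x]) := by
        simp [ntLoopFound, hx]
      rw [hstep, ih, PySem.List.index?_cons_of_ne _ hx]
      cases h : PySem.List.index? xs sym with
      | none => simp
      | some k => simp [List.take_succ_cons]

theorem ntLoop_eq_alt (sym : String) (l : List String) :
    ntLoop sym l = newTuple_by_sym_alt l sym := by
  induction l with
  | nil => simp [ntLoop, newTuple_by_sym_alt, PySem.List.index?]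
  | cons x xs ih =>
    by_cases hx : x = sym
    · subst hx
      have hstep : ntLoop x (x :: xs) = ntLoopFound x xs [x] := by simp [ntLoop]
      rw [hstep, ntLoopFound_eq]
      unfold newTuple_by_sym_alt
      rw [PySem.List.index?_cons_self]
      simp only [List.drop_succ_cons, List.drop_zero]
      cases h : PySem.List.index? xs x with
      | none => simp
      | some k => simp [List.take_succ_cons]
    · have hstep : ntLoop sym (x :: xs) = ntLoop sym xs := by simp [ntLoop, hx]
      rw [hstep, ih]
      unfold newTuple_by_sym_alt
      rw [PySem.List.index?_cons_of_ne _ hx]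
      cases h : PySem.List.index? xs sym with
      | none => rfl
      | some i => simp

-- ===== VERDICT (by name: the statement is the Claim_ definition above) =====
theorem newTuple_by_sym_spec : Claim_equal_newTuple_by_sym := by
  intro isTuple sym _
  unfold Spec_newTuple_by_sym newTuple_by_sym
  exact ntLoop_eq_alt sym isTuple
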